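-- pv_equiv track=rewrite | github.com/weiyangzen/awesome_algorithms | Algorithms/数学-计算拓扑-0253-离散Morse理论/demo.py | greedy_acyclic_matching
-- ===== SOURCE A (Python) =====
-- from typing import Dict, Iterable, List, Sequence, Set, Tuple
--
-- Simplex = Tuple[int, ...]
--
-- Pair = Tuple[Simplex, Simplex]  # (p-cell, (p+1)-cell)
--
-- def simplex_dim(s: Simplex) -> int:
--     return len(s) - 1
--
-- def faces_of(simplex: Simplex) -> List[Simplex]:
--     """返回一个单纯形的所有余维 1 面。"""
--     if len(simplex) <= 1:
--         return []
--     return [tuple(simplex[:i] + simplex[i + 1 :]) for i in range(len(simplex))]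
--
-- def incidence_pairs(cells_by_dim: Dict[int, List[Simplex]]) -> List[Pair]:
--     """列出所有 (alpha^p, beta^(p+1))，其中 alpha 是 beta 的面。"""
--     pairs: List[Pair] = []
--     max_dim = max(cells_by_dim)
--     for p in range(max_dim):
--         low_cells = cells_by_dim.get(p, [])
--         high_cells = cells_by_dim.get(p + 1, [])
--         low_set = set(low_cells)
--         for beta in high_cells:
--             for alpha in faces_of(beta):
--                 if alpha in low_set:
--                     pairs.append((alpha, beta))
--     # 固定顺序，保证复现
--     pairs.sort(key=lambda x: (simplex_dim(x[0]), x[0], x[1]))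
--     return pairs
--
-- def build_orientation(
--     pairs_all: Sequence[Pair],
--     matched: Set[Pair],
--     cells: Sequence[Simplex],
-- ) -> Dict[Simplex, List[Simplex]]:
--     """按 Forman 方向规则构建有向图。
--
--     - 未匹配关联边：高维 -> 低维
--     - 匹配关联边：低维 -> 高维
--     """
--     adj: Dict[Simplex, List[Simplex]] = {c: [] for c in cells}
--     matched_set = set(matched)
--     for alpha, beta in pairs_all:
--         if (alpha, beta) in matched_set:
--             adj[alpha].append(beta)
--         else:
--             adj[beta].append(alpha)
--     return adj
--
-- def has_cycle(adj: Dict[Simplex, List[Simplex]]) -> bool: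
--     """DFS 检测有向环。"""
--     color: Dict[Simplex, int] = {node: 0 for node in adj}  # 0未访问,1访问中,2完成
--
--     def dfs(u: Simplex) -> bool:
--         color[u] = 1
--         for v in adj[u]:
--             if color[v] == 1:
--                 return True
--             if color[v] == 0 and dfs(v):
--                 return True
--         color[u] = 2
--         return False
--
--     for node in adj:
--         if color[node] == 0 and dfs(node):
--             return True
--     return False
--
-- def greedy_acyclic_matching(cells_by_dim: Dict[int, List[Simplex]]) -> Set[Pair]:
--     """贪心构建离散向量场：只接受不引入有向环的匹配。"""
--     all_cells = [c for d in sorted(cells_by_dim) for c in cells_by_dim[d]]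
--     all_pairs = incidence_pairs(cells_by_dim)
--     matched: Set[Pair] = set()
--     used_cells: Set[Simplex] = set()
--
--     for alpha, beta in all_pairs:
--         if alpha in used_cells or beta in used_cells:
--             continue
--
--         tentative = set(matched)
--         tentative.add((alpha, beta))
--         adj = build_orientation(all_pairs, tentative, all_cells)
--
--         if not has_cycle(adj):
--             matched.add((alpha, beta))
--             used_cells.add(alpha)
--             used_cells.add(beta)
--
--     return matched
-- ===== SOURCE B (Python) =====
-- def greedy_acyclic_matching(cells_by_dim):
--     """Same greedy Morse matching, decomposed differently: recursive peel for
--     codim-1 faces, comprehension-built pair list, a node-major orientation dict,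
--     and an explicit-stack (iterative) three-colour DFS driven by a pop worklist."""
--     dims = sorted(cells_by_dim)
--     cells = [c for p in dims for c in cells_by_dim[p]]
--     max_dim = max(cells_by_dim)
--     pairs = []
--     for p in range(max_dim):
--         low = set(cells_by_dim.get(p, ()))
--         pairs += [(alpha, beta)
--                   for beta in cells_by_dim.get(p + 1, ())
--                   for alpha in _cofaces(beta)
--                   if alpha in low]
--     pairs.sort(key=lambda q: (len(q[0]) - 1, q[0], q[1]))
--     matched = set()
--     used = set()
--     work = pairs[::-1]
--     while work:
--         alpha, beta = work.pop()
--         if alpha in used or beta in used: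
--             continue
--         if not _blocked(pairs, cells, matched, alpha, beta):
--             matched.add((alpha, beta))
--             used.add(alpha)
--             used.add(beta)
--     return matched
--
--
-- def _cofaces(s):
--     """Codim-1 faces by structural recursion instead of index slicing."""
--     if len(s) <= 1:
--         return []
--     return _peel(s)
--
--
-- def _peel(s):
--     if len(s) == 1:
--         return [()]
--     return [s[1:]] + [(s[0],) + f for f in _peel(s[1:])]
--
--
-- def _blocked(pairs, cells, matched, alpha, beta):
--     """True iff the orientation with (alpha, beta) also matched has a cycle."""
--     def hi(q):
--         return q in matched or q == (alpha, beta)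
--     adj = {c: [(q[1] if hi(q) else q[0]) for q in pairs
--                if (q[0] if hi(q) else q[1]) == c]
--            for c in cells}
--     color = {c: 0 for c in adj}
--     for root in adj:
--         if color[root] != 0:
--             continue
--         color[root] = 1
--         stack = [(root, adj[root])]
--         while stack:
--             u, rem = stack[-1]
--             if not rem:
--                 color[u] = 2
--                 stack.pop()
--                 continue
--             v, rem = rem[0], rem[1:]
--             stack[-1] = (u, rem)
--             if color[v] == 1:
--                 return True
--             if color[v] == 0:
--                 color[v] = 1
--                 stack.append((v, adj[v]))
--     return False
-- ===== Notes on version B (the rewrite author's own statement) =====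
-- stated objective: alternative
-- what changed: B keeps the greedy acyclicity-checked matching but re-decomposes every stage: codim-1 faces by structural recursion (peel head / cons head) instead of index slicing, the incidence pair list by comprehensions instead of nested append loops, the tentative orientation built node-major (one comprehension per cell scanning the pair list) instead of edge-major appends, and the cycle test as an iterative three-colour DFS over an explicit frame stack driven by a pop worklist instead of A's recursive DFS with a rebuilt tentative set.
import Mathlib
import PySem

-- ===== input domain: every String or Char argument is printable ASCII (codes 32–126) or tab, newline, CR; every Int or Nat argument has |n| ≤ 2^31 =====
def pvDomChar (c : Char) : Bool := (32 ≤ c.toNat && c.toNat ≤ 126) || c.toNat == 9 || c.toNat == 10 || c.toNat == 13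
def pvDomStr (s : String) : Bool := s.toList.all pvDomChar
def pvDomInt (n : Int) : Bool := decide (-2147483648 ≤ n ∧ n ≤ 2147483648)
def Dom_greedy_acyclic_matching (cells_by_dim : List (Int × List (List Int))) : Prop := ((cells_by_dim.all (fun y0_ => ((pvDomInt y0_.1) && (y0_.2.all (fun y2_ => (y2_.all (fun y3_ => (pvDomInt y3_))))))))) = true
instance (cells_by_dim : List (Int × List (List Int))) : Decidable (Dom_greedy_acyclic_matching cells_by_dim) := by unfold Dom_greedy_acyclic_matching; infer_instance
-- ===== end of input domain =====

-- B keeps A's greedy acyclicity-checked matching but re-decomposes every stage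
-- (recursive face peeling, comprehension pair list, node-major orientation,
-- explicit-stack iterative DFS); same return value, no speed claim.

-- ===== PORT A =====
-- Argument decoding shared by both ports: the Python callee receives a dict; the
-- association list becomes that dict by Python's construction rule (later duplicate
-- keys overwrite in place).
def pvToDict (cells_by_dim : List (Int × List (List Int))) : PySem.Dict Int (List (List Int)) :=
  cells_by_dim.foldl (fun d kv => d.insert kv.1 kv.2) PySem.Dict.empty

def pvA_simplexDim (s : List Int) : Int := PySem.List.len s - 1

def pvA_facesOf (s : List Int) : List (List Int) :=
  if s.length ≤ 1 then []
  else (PySem.List.pyRange 0 (PySem.List.len s) 1).map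
    (fun i => PySem.List.slice s none (some i) ++ PySem.List.slice s (some (i + 1)) none)

def pvA_incidencePairs (d : PySem.Dict Int (List (List Int))) : List (List Int × List Int) :=
  -- max(cells_by_dim) raises ValueError on an empty dict: excluded by Pre_ (the .getD 0 is never read there)
  let maxDim : Int := (PySem.List.max? d.keys (fun k => k)).getD 0
  let pairs := (PySem.List.pyRange 0 maxDim 1).foldl (fun pairs p =>
    let lowCells := d.getD p []
    let highCells := d.getD (p + 1) []
    let lowSet := PySem.Set.ofList lowCells
    highCells.foldl (fun pairs beta =>
      (pvA_facesOf beta).foldl (fun pairs alpha =>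
        if lowSet.contains alpha then pairs ++ [(alpha, beta)] else pairs) pairs) pairs) []
  PySem.List.sorted pairs (fun x => [[pvA_simplexDim x.1], x.1, x.2])

def pvA_buildOrientation (pairsAll : List (List Int × List Int))
    (matched : PySem.Set (List Int × List Int)) (cells : List (List Int)) :
    PySem.Dict (List Int) (List (List Int)) :=
  let adj := cells.foldl (fun a c => a.insert c []) PySem.Dict.empty
  let matchedSet := PySem.Set.ofList matched
  pairsAll.foldl (fun a pr =>
    if matchedSet.contains pr then a.modify pr.1 [] (fun l => l ++ [pr.2])
    else a.modify pr.2 [] (fun l => l ++ [pr.1])) adj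

-- dfs of has_cycle; color values: 0 white, 1 gray, 2 black; the recursion is run with
-- fuel := number of nodes + 1, which is never exhausted (dfs recursion depth ≤ #white nodes)
mutual
def pvA_dfs (adj : PySem.Dict (List Int) (List (List Int))) :
    Nat → List Int → PySem.Dict (List Int) Int → Bool × PySem.Dict (List Int) Int
  | 0, _, color => (false, color)
  | fuel + 1, u, color =>
    match pvA_dfsNbrs adj fuel (adj.getD u []) (color.insert u 1) with
    | (true, c2) => (true, c2)
    | (false, c2) => (false, c2.insert u 2)
termination_by fuel _ _ => (fuel, 0)

def pvA_dfsNbrs (adj : PySem.Dict (List Int) (List (List Int))) :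
    Nat → List (List Int) → PySem.Dict (List Int) Int → Bool × PySem.Dict (List Int) Int
  | _, [], color => (false, color)
  | fuel, v :: vs, color =>
    if color.getD v 0 == 1 then (true, color)
    else if color.getD v 0 == 0 then
      match pvA_dfs adj fuel v color with
      | (true, c') => (true, c')
      | (false, c') => pvA_dfsNbrs adj fuel vs c'
    else pvA_dfsNbrs adj fuel vs color
termination_by fuel vs _ => (fuel, vs.length + 1)
end

def pvA_hcLoop (adj : PySem.Dict (List Int) (List (List Int))) :
    List (List Int) → PySem.Dict (List Int) Int → Bool
  | [], _ => false
  | n :: ns, color =>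
    if color.getD n 0 == 0 then
      match pvA_dfs adj (adj.size + 1) n color with
      | (true, _) => true
      | (false, c') => pvA_hcLoop adj ns c'
    else pvA_hcLoop adj ns color

def pvA_hasCycle (adj : PySem.Dict (List Int) (List (List Int))) : Bool :=
  let color0 := adj.keys.foldl (fun c k => c.insert k 0) PySem.Dict.empty
  pvA_hcLoop adj adj.keys color0

-- the body of A's greedy for-loop
def pvA_step (allPairs : List (List Int × List Int)) (allCells : List (List Int))
    (st : PySem.Set (List Int × List Int) × PySem.Set (List Int))
    (pr : List Int × List Int) : PySem.Set (List Int × List Int) × PySem.Set (List Int) :=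
  if st.2.contains pr.1 || st.2.contains pr.2 then st
  else
    let tentative := PySem.Set.add (PySem.Set.ofList st.1) pr
    let adj := pvA_buildOrientation allPairs tentative allCells
    if pvA_hasCycle adj then st
    else (PySem.Set.add st.1 pr, PySem.Set.add (PySem.Set.add st.2 pr.1) pr.2)

def greedy_acyclic_matching (cells_by_dim : List (Int × List (List Int))) : List (List Int × List Int) :=
  let d := pvToDict cells_by_dim
  let allCells := (PySem.List.sorted d.keys (fun k => k)).foldl (fun acc k => acc ++ d.getD k []) []
  let allPairs := pvA_incidencePairs d
  (allPairs.foldl (pvA_step allPairs allCells) (PySem.Set.empty, PySem.Set.empty)).1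

-- ===== PORT B =====
-- _peel: codim-1 faces by structural recursion (len(s) == 1 is the base case;
-- _peel is only reached with len(s) ≥ 1)
def pvB_peel : List Int → List (List Int)
  | [] => [[]]            -- unreachable guard (Python's recursion never sees the empty tuple)
  | [_] => [[]]
  | x :: y :: r => (y :: r) :: (pvB_peel (y :: r)).map (fun f => x :: f)

def pvB_cofaces (s : List Int) : List (List Int) :=
  if PySem.List.len s ≤ 1 then [] else pvB_peel s

-- the closure `hi` of _blocked
def pvB_hi (matched : PySem.Set (List Int × List Int)) (cand : List Int × List Int)
    (q : List Int × List Int) : Bool :=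
  matched.contains q || q == cand

-- node-major orientation dict: one comprehension per cell scanning the pair list
def pvB_orient (pairs : List (List Int × List Int)) (cells : List (List Int))
    (matched : PySem.Set (List Int × List Int)) (cand : List Int × List Int) :
    PySem.Dict (List Int) (List (List Int)) :=
  cells.foldl (fun d c => d.insert c
    ((pairs.filter (fun q => (if pvB_hi matched cand q then q.1 else q.2) == c)).map
      (fun q => if pvB_hi matched cand q then q.2 else q.1))) PySem.Dict.empty

-- termination measure for the explicit frame stack (Lean-side only; the Python
-- while-loop needs no fuel)
def pvRank (b : Nat) : List (Nat × List Int × List (List Int)) → Nat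
  | [] => 0
  | (g, _, vs) :: rest => (b + 2) ^ g * (vs.length + 1) + pvRank b rest

-- the `while stack:` loop of _blocked; each frame is (fuel, node, remaining
-- neighbours); the per-frame fuel and the `.take b` are totality guards only —
-- they never bite, because the stack never holds more frames than there are nodes
def pvB_machine (adj : PySem.Dict (List Int) (List (List Int))) (b : Nat) :
    List (Nat × List Int × List (List Int)) → PySem.Dict (List Int) Int →
    Bool × PySem.Dict (List Int) Int
  | [], color => (false, color)
  | (_, u, []) :: rest, color => pvB_machine adj b rest (color.insert u 2)
  | (0, u, v :: vs) :: rest, color =>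
    if color.getD v 0 == 1 then (true, color)
    else if color.getD v 0 == 0 then pvB_machine adj b ((0, u, vs) :: rest) color
    else pvB_machine adj b ((0, u, vs) :: rest) color
  | (h + 1, u, v :: vs) :: rest, color =>
    if color.getD v 0 == 1 then (true, color)
    else if color.getD v 0 == 0 then
      pvB_machine adj b ((h, v, (adj.getD v []).take b) :: (h + 1, u, vs) :: rest)
        (color.insert v 1)
    else pvB_machine adj b ((h + 1, u, vs) :: rest) color
termination_by stack _ => pvRank b stack
decreasing_by
  · simp only [pvRank]
    exact Nat.lt_add_of_pos_left (by positivity)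
  · simp only [pvRank, List.length_cons, pow_zero, one_mul]; omega
  · simp only [pvRank, List.length_cons, pow_zero, one_mul]; omega
  · simp only [pvRank, List.length_cons, Nat.succ_eq_add_one]
    have hA : (b + 2) ^ h * (((adj.getD v []).take b).length + 1) < (b + 2) ^ (h + 1) := by
      have hT : ((adj.getD v []).take b).length ≤ b := List.length_take_le _ _
      calc (b + 2) ^ h * (((adj.getD v []).take b).length + 1)
          < (b + 2) ^ h * (b + 2) := by gcongr <;> omega
        _ = (b + 2) ^ (h + 1) := (pow_succ _ _).symm
    have e : (b + 2) ^ (h + 1) * (vs.length + 1 + 1)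
        = (b + 2) ^ (h + 1) * (vs.length + 1) + (b + 2) ^ (h + 1) := by ring
    rw [e]
    linarith
  · simp only [pvRank, List.length_cons, Nat.succ_eq_add_one]
    have e : (b + 2) ^ (h + 1) * (vs.length + 1 + 1)
        = (b + 2) ^ (h + 1) * (vs.length + 1) + (b + 2) ^ (h + 1) := by ring
    rw [e]
    have hp : 0 < (b + 2) ^ (h + 1) := by positivity
    linarith

-- the `for root in adj:` loop of _blocked
def pvB_rootLoop (adj : PySem.Dict (List Int) (List (List Int))) (b : Nat) :
    List (List Int) → PySem.Dict (List Int) Int → Bool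
  | [], _ => false
  | n :: ns, color =>
    if color.getD n 0 == 0 then
      match pvB_machine adj b [(adj.size, n, (adj.getD n []).take b)] (color.insert n 1) with
      | (true, _) => true
      | (false, c') => pvB_rootLoop adj b ns c'
    else pvB_rootLoop adj b ns color

def pvB_blocked (pairs : List (List Int × List Int)) (cells : List (List Int))
    (matched : PySem.Set (List Int × List Int)) (cand : List Int × List Int) : Bool :=
  let adj := pvB_orient pairs cells matched cand
  let b := adj.values.foldl (fun m l => max m l.length) 0
  let color0 := adj.keys.foldl (fun c k => c.insert k 0) PySem.Dict.empty
  pvB_rootLoop adj b adj.keys color0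

-- the sorted incidence-pair list, built by comprehensions
def pvB_pairs (d : PySem.Dict Int (List (List Int))) (maxDim : Int) :
    List (List Int × List Int) :=
  PySem.List.sorted
    ((PySem.List.pyRange 0 maxDim 1).foldl (fun pairs p =>
      let low := PySem.Set.ofList (d.getD p [])
      pairs ++ (d.getD (p + 1) []).flatMap (fun beta =>
        ((pvB_cofaces beta).filter low.contains).map (fun alpha => (alpha, beta)))) [])
    (fun q => [[PySem.List.len q.1 - 1], q.1, q.2])

-- the `while work:` greedy loop; `work = pairs[::-1]` popped from the right end
-- visits the pairs in their original order, so the worklist is modelled head-first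
def pvB_go (pairs : List (List Int × List Int)) (cells : List (List Int)) :
    List (List Int × List Int) → PySem.Set (List Int × List Int) → PySem.Set (List Int) →
    PySem.Set (List Int × List Int)
  | [], matched, _ => matched
  | pr :: work, matched, used =>
    if used.contains pr.1 || used.contains pr.2 then pvB_go pairs cells work matched used
    else if pvB_blocked pairs cells matched pr then pvB_go pairs cells work matched used
    else pvB_go pairs cells work (PySem.Set.add matched pr)
      (PySem.Set.add (PySem.Set.add used pr.1) pr.2)

def greedy_acyclic_matching_alt (cells_by_dim : List (Int × List (List Int))) : List (List Int × List Int) :=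
  let d := pvToDict cells_by_dim
  let dims := PySem.List.sorted d.keys (fun k => k)
  let cells := dims.flatMap (fun p => d.getD p [])
  -- max(cells_by_dim): ValueError on the empty dict, excluded by Pre_ (the .getD 0 is never read there)
  let maxDim : Int := (PySem.List.max? d.keys (fun k => k)).getD 0
  let pairs := pvB_pairs d maxDim
  pvB_go pairs cells pairs PySem.Set.empty PySem.Set.empty

-- ===== PRECONDITION & SPEC =====
-- Pre_ excludes only the empty dict, on which A raises ValueError (max() of an empty sequence).
def Pre_greedy_acyclic_matching (cells_by_dim : List (Int × List (List Int))) : Prop :=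
  cells_by_dim ≠ []
instance (cells_by_dim : List (Int × List (List Int))) : Decidable (Pre_greedy_acyclic_matching cells_by_dim) := by unfold Pre_greedy_acyclic_matching; infer_instance
def pvWitness_greedy_acyclic_matching : (List (Int × List (List Int))) :=
  [(0, [[1], [2]]), (1, [[1, 2]])]
def Spec_greedy_acyclic_matching (cells_by_dim : List (Int × List (List Int))) (out : List (List Int × List Int)) : Prop := out = greedy_acyclic_matching_alt cells_by_dim
instance (cells_by_dim : List (Int × List (List Int))) (out : List (List Int × List Int)) : Decidable (Spec_greedy_acyclic_matching cells_by_dim out) := by unfold Spec_greedy_acyclic_matching; infer_instance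

-- ===== CLAIM (what is proved, stated in full; the proofs are below) =====
def Claim_equal_greedy_acyclic_matching : Prop := ∀ (cells_by_dim : List (Int × List (List Int))), Dom_greedy_acyclic_matching cells_by_dim → Pre_greedy_acyclic_matching cells_by_dim → Spec_greedy_acyclic_matching cells_by_dim (greedy_acyclic_matching cells_by_dim)

-- ===== LEMMAS AND PROOFS =====

lemma pv_peel_eq (s : List Int) (hs : s ≠ []) :
    pvB_peel s = (List.range s.length).map (fun i => s.take i ++ s.drop (i + 1)) := by
  induction s with
  | nil => simp at hs
  | cons x r IH =>
    match r with
    | [] => simp [pvB_peel]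
    | y :: r' =>
      rw [pvB_peel, IH (by simp)]
      simp only [List.length_cons, List.range_succ_eq_map, List.map_cons, List.map_map]
      simp [Function.comp_def]

lemma pv_faces_eq (s : List Int) : pvA_facesOf s = pvB_cofaces s := by
  unfold pvA_facesOf pvB_cofaces
  by_cases h : s.length ≤ 1
  · have h2 : PySem.List.len s ≤ 1 := by rw [PySem.List.len_eq]; exact_mod_cast h
    rw [if_pos h, if_pos h2]
  · have h2 : ¬ PySem.List.len s ≤ 1 := by rw [PySem.List.len_eq]; exact_mod_cast h
    rw [if_neg h, if_neg h2, pv_peel_eq s (by intro e; subst e; simp at h)]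
    rw [PySem.List.len_eq, PySem.List.pyRange_one]
    simp only [sub_zero, Int.toNat_natCast, List.map_map]
    apply List.map_congr_left
    intro k hk
    simp only [Function.comp_def, zero_add]
    rw [PySem.List.slice_to_natCast]
    have hc : ((k : Int) + 1) = ((k + 1 : Nat) : Int) := by push_cast; ring
    rw [hc, PySem.List.slice_from_natCast]

lemma pv_getD_foldl_insert {κ ν : Type} [BEq κ] [LawfulBEq κ] [DecidableEq κ]
    (C : List κ) (G : κ → ν) (d0 : PySem.Dict κ ν) (x : κ) (dflt : ν) :
    (C.foldl (fun d c => d.insert c (G c)) d0).getD x dflt =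
      if x ∈ C then G x else d0.getD x dflt := by
  induction C generalizing d0 with
  | nil => simp
  | cons c r IH =>
    rw [List.foldl_cons, IH]
    by_cases hr : x ∈ r
    · simp [hr]
    · by_cases hc : x = c
      · subst hc; simp [hr]
      · simp [hr, hc, PySem.Dict.getD_insert]

lemma pv_hi_eq (m : PySem.Set (List Int × List Int)) (pr q : List Int × List Int)
    (hm : m.Nodup) :
    (PySem.Set.ofList (PySem.Set.add (PySem.Set.ofList m) pr)).contains q = pvB_hi m pr q := by
  rw [PySem.Set.ofList_eq_self_of_nodup m hm]
  rw [PySem.Set.ofList_eq_self_of_nodup _ (PySem.Set.nodup_add m pr hm)]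
  rw [Bool.eq_iff_iff]
  unfold pvB_hi
  simp [PySem.Set.mem_add]

lemma pv_bound (adj : PySem.Dict (List Int) (List (List Int))) (v : List Int) :
    (adj.getD v []).length ≤ adj.values.foldl (fun m l => max m l.length) 0 := by
  cases h : adj.get? v with
  | none => simp [PySem.Dict.getD_of_get?_eq_none adj _ h]
  | some w =>
    rw [PySem.Dict.getD_of_get?_eq_some adj _ h]
    have hw : w ∈ adj.values := by
      have := PySem.Dict.mem_items_of_get?_eq_some adj h
      simp only [PySem.Dict.values]
      exact List.mem_map_of_mem this
    exact (PySem.List.le_foldl_max_nat adj.values List.length 0).2 w hw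

lemma pv_machine_frame (adj : PySem.Dict (List Int) (List (List Int))) (b : Nat)
    (hb : ∀ v, (adj.getD v []).length ≤ b) :
    ∀ N g u vs rest color, pvRank b ((g, u, vs) :: rest) < N →
      pvB_machine adj b ((g, u, vs) :: rest) color =
        (match pvA_dfsNbrs adj g vs color with
         | (true, c) => (true, c)
         | (false, c) => pvB_machine adj b rest (c.insert u 2)) := by
  intro N
  induction N with
  | zero => intro g u vs rest color h; omega
  | succ N IH =>
    intro g u vs rest color hrank
    match vs with
    | [] =>
      rw [pvB_machine, pvA_dfsNbrs]
    | v :: vs' =>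
      match g with
      | 0 =>
        rw [pvB_machine, pvA_dfsNbrs, pvA_dfs]
        by_cases h1 : (color.getD v 0 == 1) = true
        · simp only [if_pos h1]
        · simp only [if_neg h1]
          have hr : pvRank b ((0, u, vs') :: rest) < N := by
            simp only [pvRank, List.length_cons, pow_zero, one_mul] at hrank ⊢
            omega
          by_cases h0 : (color.getD v 0 == 0) = true
          · simp only [if_pos h0]
            rw [IH 0 u vs' rest color hr]
          · simp only [if_neg h0]
            rw [IH 0 u vs' rest color hr]
      | h + 1 =>
        rw [pvB_machine, pvA_dfsNbrs, pvA_dfs]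
        by_cases h1 : (color.getD v 0 == 1) = true
        · simp only [if_pos h1]
        · simp only [if_neg h1]
          by_cases h0 : (color.getD v 0 == 0) = true
          · simp only [if_pos h0]
            have hbv : (adj.getD v []).take b = adj.getD v [] :=
              List.take_of_length_le (hb v)
            have hr1 : pvRank b ((h, v, (adj.getD v []).take b) :: (h + 1, u, vs') :: rest) < N := by
              simp only [pvRank, List.length_cons, hbv] at hrank ⊢
              have hA : (b + 2) ^ h * ((adj.getD v []).length + 1) < (b + 2) ^ (h + 1) := by
                have hTv := hb v
                calc (b + 2) ^ h * ((adj.getD v []).length + 1)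
                    < (b + 2) ^ h * (b + 2) := by gcongr <;> omega
                  _ = (b + 2) ^ (h + 1) := (pow_succ _ _).symm
              have e : (b + 2) ^ (h + 1) * (vs'.length + 1 + 1)
                  = (b + 2) ^ (h + 1) * (vs'.length + 1) + (b + 2) ^ (h + 1) := by ring
              rw [e] at hrank
              linarith
            rw [IH h v _ _ (color.insert v 1) hr1]
            rw [hbv]
            cases hres : pvA_dfsNbrs adj h (adj.getD v []) (color.insert v 1) with
            | mk bb c =>
              cases bb with
              | true => rfl
              | false =>
                have hr2 : pvRank b ((h + 1, u, vs') :: rest) < N := by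
                  simp only [pvRank, List.length_cons] at hrank ⊢
                  have e : (b + 2) ^ (h + 1) * (vs'.length + 1 + 1)
                      = (b + 2) ^ (h + 1) * (vs'.length + 1) + (b + 2) ^ (h + 1) := by ring
                  rw [e] at hrank
                  have hp : 0 < (b + 2) ^ (h + 1) := by positivity
                  linarith
                dsimp only
                rw [IH (h + 1) u vs' rest (c.insert v 2) hr2]
          · simp only [if_neg h0]
            have hr : pvRank b ((h + 1, u, vs') :: rest) < N := by
              simp only [pvRank, List.length_cons] at hrank ⊢
              have e : (b + 2) ^ (h + 1) * (vs'.length + 1 + 1)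
                  = (b + 2) ^ (h + 1) * (vs'.length + 1) + (b + 2) ^ (h + 1) := by ring
              rw [e] at hrank
              have hp : 0 < (b + 2) ^ (h + 1) := by positivity
              linarith
            rw [IH (h + 1) u vs' rest color hr]

lemma pv_rootLoop_eq (adj : PySem.Dict (List Int) (List (List Int))) (b : Nat)
    (hb : ∀ v, (adj.getD v []).length ≤ b) :
    ∀ roots color, pvB_rootLoop adj b roots color = pvA_hcLoop adj roots color := by
  intro roots
  induction roots with
  | nil => intro color; rw [pvB_rootLoop, pvA_hcLoop]
  | cons n ns IH =>
    intro color
    rw [pvB_rootLoop, pvA_hcLoop]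
    by_cases h0 : (color.getD n 0 == 0) = true
    · simp only [if_pos h0]
      have hbn : (adj.getD n []).take b = adj.getD n [] := List.take_of_length_le (hb n)
      rw [pvA_dfs]
      rw [pv_machine_frame adj b hb (pvRank b [(adj.size, n, (adj.getD n []).take b)] + 1)
        adj.size n _ [] (color.insert n 1) (by omega)]
      rw [hbn]
      cases hres : pvA_dfsNbrs adj adj.size (adj.getD n []) (color.insert n 1) with
      | mk bb c =>
        cases bb with
        | true => rfl
        | false =>
          dsimp only
          rw [pvB_machine]
          dsimp only
          rw [IH (c.insert n 2)]
    · simp only [if_neg h0]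
      exact IH color

lemma pv_orient_eq (P : List (List Int × List Int)) (C : List (List Int))
    (m : PySem.Set (List Int × List Int)) (pr : List Int × List Int)
    (hm : m.Nodup) (hPC : ∀ q ∈ P, q.1 ∈ C ∧ q.2 ∈ C) :
    pvA_buildOrientation P (PySem.Set.add (PySem.Set.ofList m) pr) C = pvB_orient P C m pr := by
  unfold pvA_buildOrientation pvB_orient
  have hfold :
      P.foldl (fun a q =>
          if (PySem.Set.ofList (PySem.Set.add (PySem.Set.ofList m) pr)).contains q then
            a.modify q.1 [] (fun l => l ++ [q.2])
          else a.modify q.2 [] (fun l => l ++ [q.1]))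
        (C.foldl (fun a c => a.insert c []) PySem.Dict.empty)
      = (P.map (fun q => (if pvB_hi m pr q then q.1 else q.2,
                          if pvB_hi m pr q then q.2 else q.1))).foldl
          (fun a p => a.modify p.1 [] (fun l => l ++ [p.2]))
          (C.foldl (fun a c => a.insert c []) PySem.Dict.empty) := by
    rw [List.foldl_map]
    apply PySem.List.foldl_congr_mem
    intro a q hq
    rw [pv_hi_eq m pr q hm]
    by_cases h : pvB_hi m pr q = true
    · simp only [h, if_true]
    · simp only [h, if_false, Bool.false_eq_true]
  rw [hfold]
  have hkinit : (C.foldl (fun a c => a.insert c ([] : List (List Int))) PySem.Dict.empty).keys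
      = PySem.Set.ofList C := by
    rw [PySem.Dict.keys_foldl_insert_key (key := fun x => x) (f := fun _ _ => [])]
    simp only [PySem.Dict.keys_empty, List.map_id_fun']
    exact PySem.Set.update_nil_left C
  have hninit : (C.foldl (fun a c => a.insert c ([] : List (List Int))) PySem.Dict.empty).keys.Nodup := by
    rw [hkinit]; exact PySem.Set.nodup_ofList C
  have hkA : ((P.map (fun q => (if pvB_hi m pr q then q.1 else q.2,
                          if pvB_hi m pr q then q.2 else q.1))).foldl
          (fun a p => a.modify p.1 [] (fun l => l ++ [p.2]))
          (C.foldl (fun a c => a.insert c []) PySem.Dict.empty)).keys = PySem.Set.ofList C := by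
    rw [PySem.Dict.keys_foldl_modify_key (key := Prod.fst) (d0 := [])
      (f := fun _ p l => l ++ [p.2]), hkinit]
    rw [PySem.Set.update_eq_append_filter]
    have hnil : List.filter (fun y => !(PySem.Set.ofList C).contains y)
        (PySem.Set.ofList (List.map Prod.fst (P.map (fun q => (if pvB_hi m pr q then q.1 else q.2,
          if pvB_hi m pr q then q.2 else q.1))))) = [] := by
      rw [List.filter_eq_nil_iff]
      intro y hy
      have hy2 : y ∈ List.map Prod.fst (P.map (fun q => (if pvB_hi m pr q then q.1 else q.2,
          if pvB_hi m pr q then q.2 else q.1))) := by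
        have := PySem.Set.mem_ofList (xs := List.map Prod.fst (P.map (fun q =>
          (if pvB_hi m pr q then q.1 else q.2, if pvB_hi m pr q then q.2 else q.1)))) (y := y)
        exact this.mp hy
      rw [List.map_map] at hy2
      obtain ⟨q, hqP, hqy⟩ := List.mem_map.mp hy2
      have hyC : y ∈ C := by
        rcases hPC q hqP with ⟨h1, h2⟩
        by_cases h : pvB_hi m pr q = true <;> simp [h, Function.comp] at hqy <;> subst hqy <;> assumption
      simp [PySem.Set.mem_ofList, hyC]
    rw [hnil, List.append_nil]
  have hkB : (C.foldl (fun d c => d.insert c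
      ((P.filter (fun q => (if pvB_hi m pr q then q.1 else q.2) == c)).map
        (fun q => if pvB_hi m pr q then q.2 else q.1))) PySem.Dict.empty).keys
      = PySem.Set.ofList C := by
    rw [PySem.Dict.keys_foldl_insert_key (key := fun x => x)
      (f := fun _ c => (P.filter (fun q => (if pvB_hi m pr q then q.1 else q.2) == c)).map
        (fun q => if pvB_hi m pr q then q.2 else q.1))]
    simp only [PySem.Dict.keys_empty, List.map_id_fun']
    exact PySem.Set.update_nil_left C
  apply PySem.Dict.ext
  rw [PySem.Dict.items_eq_map_keys _ (by
      rw [hkA]; exact PySem.Set.nodup_ofList C) ([] : List (List Int))]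
  rw [PySem.Dict.items_eq_map_keys _ (by
      rw [hkB]; exact PySem.Set.nodup_ofList C) ([] : List (List Int))]
  rw [hkA, hkB]
  apply List.map_congr_left
  intro k hk
  have hkC : k ∈ C := (PySem.Set.mem_ofList _ _).mp hk
  have hA : ((P.map (fun q => (if pvB_hi m pr q then q.1 else q.2,
          if pvB_hi m pr q then q.2 else q.1))).foldl
          (fun a p => a.modify p.1 [] (fun l => l ++ [p.2]))
          (C.foldl (fun a c => a.insert c []) PySem.Dict.empty)).getD k []
      = ((P.map (fun q => (if pvB_hi m pr q then q.1 else q.2,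
          if pvB_hi m pr q then q.2 else q.1))).filter (fun p => p.1 == k)).map (fun p => p.2) := by
    rw [PySem.Dict.getD_foldl_modify_append]
    rw [pv_getD_foldl_insert]
    simp
  have hB : (C.foldl (fun d c => d.insert c
      ((P.filter (fun q => (if pvB_hi m pr q then q.1 else q.2) == c)).map
        (fun q => if pvB_hi m pr q then q.2 else q.1))) PySem.Dict.empty).getD k []
      = (P.filter (fun q => (if pvB_hi m pr q then q.1 else q.2) == k)).map
        (fun q => if pvB_hi m pr q then q.2 else q.1) := by
    rw [pv_getD_foldl_insert]
    simp [hkC]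
  rw [hA, hB]
  rw [List.filter_map, List.map_map]
  rfl

-- normal form of A's incidence-pair list (pre-sort loops as flatMaps)
lemma pv_pairsA_norm (d : PySem.Dict Int (List (List Int))) :
    pvA_incidencePairs d =
      PySem.List.sorted
        ((PySem.List.pyRange 0 ((PySem.List.max? d.keys (fun k => k)).getD 0) 1).flatMap (fun p =>
          (d.getD (p + 1) []).flatMap (fun beta =>
            ((pvA_facesOf beta).filter (PySem.Set.ofList (d.getD p [])).contains).map
              (fun alpha => (alpha, beta)))))
        (fun x => [[pvA_simplexDim x.1], x.1, x.2]) := by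
  unfold pvA_incidencePairs
  simp only [PySem.List.foldl_append_if, PySem.List.foldl_append_eq_flatMap, List.nil_append]

lemma pv_pairs_eq (d : PySem.Dict Int (List (List Int))) :
    pvA_incidencePairs d = pvB_pairs d ((PySem.List.max? d.keys (fun k => k)).getD 0) := by
  rw [pv_pairsA_norm]
  unfold pvB_pairs
  congr 1
  simp only [PySem.List.foldl_append_eq_flatMap, List.nil_append, pv_faces_eq]

lemma pv_getD_sub (d : PySem.Dict Int (List (List Int))) (k : Int) (x : List Int)
    (hx : x ∈ d.getD k []) :
    x ∈ (PySem.List.sorted d.keys (fun k => k)).flatMap (fun p => d.getD p []) := by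
  cases h : d.get? k with
  | none => rw [PySem.Dict.getD_of_get?_eq_none d _ h] at hx; simp at hx
  | some w =>
    have hk : k ∈ d.keys :=
      PySem.Dict.mem_keys_of_mem_items d (PySem.Dict.mem_items_of_get?_eq_some d h)
    have hk2 : k ∈ PySem.List.sorted d.keys (fun k => k) :=
      ((PySem.List.sorted_perm d.keys (fun k => k) false).mem_iff).mpr hk
    exact List.mem_flatMap.mpr ⟨k, hk2, hx⟩

-- every incidence pair's two cells occur in the all-cells list
lemma pv_pairs_mem (d : PySem.Dict Int (List (List Int))) (q : List Int × List Int)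
    (hq : q ∈ pvA_incidencePairs d) :
    q.1 ∈ (PySem.List.sorted d.keys (fun k => k)).flatMap (fun p => d.getD p []) ∧
    q.2 ∈ (PySem.List.sorted d.keys (fun k => k)).flatMap (fun p => d.getD p []) := by
  rw [pv_pairsA_norm] at hq
  have hq2 := ((PySem.List.sorted_perm _ _ false).mem_iff).mp hq
  obtain ⟨p, _, hq3⟩ := List.mem_flatMap.mp hq2
  obtain ⟨beta, hbeta, hq4⟩ := List.mem_flatMap.mp hq3
  obtain ⟨alpha, halpha, hq5⟩ := List.mem_map.mp hq4
  obtain ⟨_, hcon⟩ := List.mem_filter.mp halpha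
  have halow : alpha ∈ d.getD p [] :=
    (PySem.Set.mem_ofList _ _).mp ((PySem.Set.contains_iff _ _).mp hcon)
  subst hq5
  exact ⟨pv_getD_sub d p alpha halow, pv_getD_sub d (p + 1) beta hbeta⟩

lemma pv_cycle_eq (P : List (List Int × List Int)) (C : List (List Int))
    (m : PySem.Set (List Int × List Int)) (pr : List Int × List Int)
    (hm : m.Nodup) (hPC : ∀ q ∈ P, q.1 ∈ C ∧ q.2 ∈ C) :
    pvA_hasCycle (pvA_buildOrientation P (PySem.Set.add (PySem.Set.ofList m) pr) C) =
      pvB_blocked P C m pr := by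
  rw [pv_orient_eq P C m pr hm hPC]
  unfold pvB_blocked pvA_hasCycle
  exact (pv_rootLoop_eq (pvB_orient P C m pr) _ (fun v => pv_bound _ v) _ _).symm

lemma pv_go_eq (P : List (List Int × List Int)) (C : List (List Int))
    (hPC : ∀ q ∈ P, q.1 ∈ C ∧ q.2 ∈ C) :
    ∀ ps (m : PySem.Set (List Int × List Int)) (u : PySem.Set (List Int)), m.Nodup →
      (ps.foldl (pvA_step P C) (m, u)).1 = pvB_go P C ps m u := by
  intro ps
  induction ps with
  | nil => intro m u hm; simp [pvB_go]
  | cons pr rest IH =>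
    intro m u hm
    rw [List.foldl_cons, pvB_go]
    by_cases hskip : (u.contains pr.1 || u.contains pr.2) = true
    · rw [if_pos hskip]
      have : pvA_step P C (m, u) pr = (m, u) := by unfold pvA_step; rw [if_pos hskip]
      rw [this]
      exact IH m u hm
    · rw [if_neg hskip]
      have hcyc := pv_cycle_eq P C m pr hm hPC
      by_cases hb : pvB_blocked P C m pr = true
      · rw [if_pos hb]
        have : pvA_step P C (m, u) pr = (m, u) := by
          unfold pvA_step
          rw [if_neg hskip]
          simp only [hcyc, hb, if_true]
        rw [this]
        exact IH m u hm
      · rw [if_neg hb]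
        have : pvA_step P C (m, u) pr
            = (PySem.Set.add m pr, PySem.Set.add (PySem.Set.add u pr.1) pr.2) := by
          unfold pvA_step
          rw [if_neg hskip]
          simp only [hcyc, hb, Bool.false_eq_true, if_false]
        rw [this]
        exact IH _ _ (PySem.Set.nodup_add m pr hm)


-- ===== VERDICT (by name: the statement is the Claim_ definition above) =====
theorem greedy_acyclic_matching_spec : Claim_equal_greedy_acyclic_matching := by
  intro cbd _ _
  unfold Spec_greedy_acyclic_matching greedy_acyclic_matching greedy_acyclic_matching_alt
  dsimp only
  rw [PySem.List.foldl_append_eq_flatMap, List.nil_append]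
  rw [pv_pairs_eq]
  exact pv_go_eq _ _
    (fun q hq => by
      rw [← pv_pairs_eq] at hq
      exact pv_pairs_mem (pvToDict cbd) q hq)
    _ PySem.Set.empty PySem.Set.empty List.nodup_nil
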